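-- pv_equiv track=rewrite | github.com/girip11/advent_of_code | aoc_2021/day_15/python/chiton.py | prepare_density_map
-- ===== SOURCE A (Python) =====
-- from typing import Iterator, List, Set, Tuple
--
-- ChitonDensityMap = List[List[int]]
--
-- Position = Tuple[int, int]
--
-- def iterate_tiles(
--     tile_size: Tuple[int, int], expand_by: int, start_tile: int
-- ) -> Iterator[Tuple[int, int]]:
--     tile_num: int = 0
--
--     # iterate by row and column of tiles
--     for i in range(0, expand_by):
--         for j in range(0, expand_by):  # pylint: disable=invalid-name
--             if tile_num >= start_tile:
--                 yield (tile_size[0] * i, tile_size[1] * j)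
--             tile_num += 1
--
-- def get_neighbor_tile_pos(
--     current_tile_pos: Position, tile_size: Tuple[int, int], map_size: Tuple[int, int]
-- ) -> Position:
--     left_tile_pos = (current_tile_pos[0], current_tile_pos[1] - tile_size[1])
--
--     if 0 <= left_tile_pos[0] < map_size[0] and 0 <= left_tile_pos[1] < map_size[1]:
--         return left_tile_pos
--
--     # position from upper tile
--     return (current_tile_pos[0] - tile_size[0], current_tile_pos[1])
--
-- def prepare_density_map(
--     chiton_density_tile: ChitonDensityMap,
--     tile_size: Tuple[int, int],
--     expand_by: int,
-- ) -> ChitonDensityMap: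
--     map_size = (tile_size[0] * expand_by, tile_size[1] * expand_by)
--     complete_density_map = [
--         chiton_density_tile[i % tile_size[0]] * expand_by for i in range(map_size[0])
--     ]
--
--     # skip the first tile
--     for start_row, start_col in iterate_tiles(tile_size, expand_by, 1):
--         for i in range(start_row, start_row + tile_size[0]):
--             for j in range(start_col, start_col + tile_size[1]):  # pylint: disable=invalid-name
--                 neighbor_tile_pos = get_neighbor_tile_pos((i, j), tile_size, map_size)
--                 complete_density_map[i][j] = (
--                     complete_density_map[neighbor_tile_pos[0]][neighbor_tile_pos[1]] + 1
--                 ) % 10 or 1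
--
--     return complete_density_map
-- ===== SOURCE B (Python) =====
-- def prepare_density_map(chiton_density_tile, tile_size, expand_by):
--     rows = tile_size[0] * expand_by
--     cols = tile_size[1] * expand_by
--     result = []
--     for i in range(rows):
--         tile_row = chiton_density_tile[i % tile_size[0]]
--         ti = i // tile_size[0]
--         row = []
--         for j in range(cols):
--             base = tile_row[j % tile_size[1]]
--             d = ti + j // tile_size[1]
--             if d == 0:
--                 row.append(base)
--             else:
--                 first = (base + 1) % 10 or 1
--                 row.append((first - 1 + (d - 1)) % 9 + 1)
--         result.append(row)
--     return result
-- ===== Notes on version B (the rewrite author's own statement) =====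
-- stated objective: simpler
-- what changed: Replaces the tile-by-tile neighbor-propagation (each expanded tile incremented from a previously written left/upper tile) with a direct per-cell closed form from the base tile value and tile distance d = i//h + j//w; Pre_ excludes inputs whose declared tile_size does not match the tile's dimensions (there A raises or returns stale repeated-row values left by its in-place construction).
-- outside the precondition, e.g. on prepare_density_map([[3, 4]], (1, 1), 2): A returns [[3, 4, 3, 4], [4, 5, 3, 4]], B returns [[3, 4], [4, 5]]
import Mathlib
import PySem

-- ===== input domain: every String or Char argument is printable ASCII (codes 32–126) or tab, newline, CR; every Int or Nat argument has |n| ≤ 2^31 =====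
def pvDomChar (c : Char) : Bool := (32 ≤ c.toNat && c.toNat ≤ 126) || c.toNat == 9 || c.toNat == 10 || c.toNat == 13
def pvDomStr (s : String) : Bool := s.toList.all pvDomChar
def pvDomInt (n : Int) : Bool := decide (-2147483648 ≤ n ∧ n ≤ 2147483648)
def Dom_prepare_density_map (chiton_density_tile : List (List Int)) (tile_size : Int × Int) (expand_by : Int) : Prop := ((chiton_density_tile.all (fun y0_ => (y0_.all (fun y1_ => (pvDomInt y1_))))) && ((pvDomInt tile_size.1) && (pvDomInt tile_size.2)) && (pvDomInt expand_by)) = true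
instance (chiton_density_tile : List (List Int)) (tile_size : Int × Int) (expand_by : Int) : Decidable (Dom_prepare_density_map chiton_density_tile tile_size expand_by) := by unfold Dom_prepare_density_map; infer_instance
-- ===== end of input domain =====

-- B replaces A's tile-by-tile neighbor propagation with a per-cell closed form (simpler; same cost).
-- Equality is about the return value only (A mutates only lists it freshly builds, never its arguments).

-- ===== PORT A =====
def iterate_tiles (tile_size : Int × Int) (expand_by : Int) (start_tile : Int) : List (Int × Int) :=
  ((PySem.List.pyRange 0 expand_by 1).foldl (fun (st : List (Int × Int) × Int) i =>
    (PySem.List.pyRange 0 expand_by 1).foldl (fun (st : List (Int × Int) × Int) j =>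
      ((if st.2 ≥ start_tile then st.1 ++ [(tile_size.1 * i, tile_size.2 * j)] else st.1), st.2 + 1)) st)
    ([], 0)).1

def get_neighbor_tile_pos (current_tile_pos : Int × Int) (tile_size : Int × Int) (map_size : Int × Int) : Int × Int :=
  if 0 ≤ current_tile_pos.1 ∧ current_tile_pos.1 < map_size.1 ∧
      0 ≤ current_tile_pos.2 - tile_size.2 ∧ current_tile_pos.2 - tile_size.2 < map_size.2 then
    (current_tile_pos.1, current_tile_pos.2 - tile_size.2)
  else
    (current_tile_pos.1 - tile_size.1, current_tile_pos.2)

-- Python's 'x or 1' on an int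
def pvOr1 (x : Int) : Int := if x = 0 then 1 else x

-- body of A's innermost statement: one in-place write 'complete_density_map[i][j] = (…+1) % 10 or 1'
def pvWrite (tile_size map_size : Int × Int) (ii : Int) (m : List (List Int)) (jj : Int) : List (List Int) :=
  PySem.List.pySetD m ii (PySem.List.pySetD (PySem.List.pyGetD m ii []) jj
    (pvOr1 (PySem.Int.mod
      (PySem.List.pyGetD
        (PySem.List.pyGetD m (get_neighbor_tile_pos (ii, jj) tile_size map_size).1 [])
        (get_neighbor_tile_pos (ii, jj) tile_size map_size).2 0 + 1) 10)))

-- the two nested for-loops over one tile's cells, factored as a helper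
def pvTileLoop (tile_size map_size : Int × Int) (m : List (List Int)) (sc : Int × Int) : List (List Int) :=
  (PySem.List.pyRange sc.1 (sc.1 + tile_size.1) 1).foldl (fun m i =>
    (PySem.List.pyRange sc.2 (sc.2 + tile_size.2) 1).foldl (pvWrite tile_size map_size i) m) m

def prepare_density_map (chiton_density_tile : List (List Int)) (tile_size : Int × Int) (expand_by : Int) : List (List Int) :=
  (iterate_tiles tile_size expand_by 1).foldl
    (pvTileLoop tile_size (tile_size.1 * expand_by, tile_size.2 * expand_by))
    ((PySem.List.pyRange 0 (tile_size.1 * expand_by) 1).map (fun i =>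
      PySem.List.pyRepeat (PySem.List.pyGetD chiton_density_tile (PySem.Int.mod i tile_size.1) []) expand_by))

-- ===== PORT B =====
def prepare_density_map_alt (chiton_density_tile : List (List Int)) (tile_size : Int × Int) (expand_by : Int) : List (List Int) :=
  (PySem.List.pyRange 0 (tile_size.1 * expand_by) 1).map (fun i =>
    (PySem.List.pyRange 0 (tile_size.2 * expand_by) 1).map (fun j =>
      if PySem.Int.floordiv i tile_size.1 + PySem.Int.floordiv j tile_size.2 = 0 then
        PySem.List.pyGetD (PySem.List.pyGetD chiton_density_tile (PySem.Int.mod i tile_size.1) [])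
          (PySem.Int.mod j tile_size.2) 0
      else
        PySem.Int.mod
          ((if PySem.Int.mod
                (PySem.List.pyGetD (PySem.List.pyGetD chiton_density_tile (PySem.Int.mod i tile_size.1) [])
                  (PySem.Int.mod j tile_size.2) 0 + 1) 10 = 0 then 1
            else PySem.Int.mod
                (PySem.List.pyGetD (PySem.List.pyGetD chiton_density_tile (PySem.Int.mod i tile_size.1) [])
                  (PySem.Int.mod j tile_size.2) 0 + 1) 10) - 1
            + (PySem.Int.floordiv i tile_size.1 + PySem.Int.floordiv j tile_size.2 - 1)) 9 + 1))

-- ===== PRECONDITION & SPEC =====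
-- Pre_ admits the degenerate region tile_size[0]*expand_by ≤ 0 (both programs build an empty map) and all
-- inputs whose tile_size matches the tile's actual dimensions; it excludes mismatched-dimension inputs, where
-- A still returns but pads/reads rows by list repetition of the wrong period and leaves stale unpropagated
-- values in the output, an accident of its in-place construction (and raises IndexError when tile_size is larger).
def Pre_prepare_density_map (chiton_density_tile : List (List Int)) (tile_size : Int × Int) (expand_by : Int) : Prop :=
  tile_size.1 * expand_by ≤ 0 ∨
  (tile_size.1 = (chiton_density_tile.length : Int) ∧
   ∀ r ∈ chiton_density_tile, (r.length : Int) = tile_size.2)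
instance (chiton_density_tile : List (List Int)) (tile_size : Int × Int) (expand_by : Int) : Decidable (Pre_prepare_density_map chiton_density_tile tile_size expand_by) := by unfold Pre_prepare_density_map; infer_instance

def pvWitness_prepare_density_map : List (List Int) × (Int × Int) × Int := ([[1, 9], [3, 4]], ((2 : Int), (2 : Int)), (3 : Int))

def Spec_prepare_density_map (chiton_density_tile : List (List Int)) (tile_size : Int × Int) (expand_by : Int) (out : List (List Int)) : Prop := out = prepare_density_map_alt chiton_density_tile tile_size expand_by
instance (chiton_density_tile : List (List Int)) (tile_size : Int × Int) (expand_by : Int) (out : List (List Int)) : Decidable (Spec_prepare_density_map chiton_density_tile tile_size expand_by out) := by unfold Spec_prepare_density_map; infer_instance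

-- ===== CLAIM (what is proved, stated in full; the proofs are below) =====
def Claim_equal_prepare_density_map : Prop := ∀ (chiton_density_tile : List (List Int)) (tile_size : Int × Int) (expand_by : Int), Dom_prepare_density_map chiton_density_tile tile_size expand_by → Pre_prepare_density_map chiton_density_tile tile_size expand_by → Spec_prepare_density_map chiton_density_tile tile_size expand_by (prepare_density_map chiton_density_tile tile_size expand_by)

-- ===== LEMMAS AND PROOFS =====

-- the base-tile value at cell (i, j)
def pvBase (T : List (List Int)) (n0 n1 : Nat) (i j : Nat) : Int :=
  (T.getD (i % n0) []).getD (j % n1) 0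

-- one propagation step: (v + 1) % 10 or 1
def pvG (v : Int) : Int := if (v + 1) % 10 = 0 then 1 else (v + 1) % 10

-- the closed-form value at cell (i, j)
def pvCell (T : List (List Int)) (n0 n1 : Nat) (i j : Nat) : Int :=
  if i / n0 + j / n1 = 0 then pvBase T n0 n1 i j
  else (pvG (pvBase T n0 n1 i j) - 1 + ((i / n0 + j / n1 : Nat) : Int) - 1) % 9 + 1

def pvVal (T : List (List Int)) (n0 n1 : Nat) (q : Nat → Nat → Bool) (i j : Nat) : Int :=
  if q i j then pvCell T n0 n1 i j else pvBase T n0 n1 i j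

-- the map state: cell (i, j) already holds its final value iff q i j
def pvMQ (T : List (List Int)) (n0 n1 R C : Nat) (q : Nat → Nat → Bool) : List (List Int) :=
  (List.range R).map (fun i => (List.range C).map (pvVal T n0 n1 q i))

-- processed-cells predicate after tiles before (a,b) and, inside tile (a,b), rows < ri and row ri cols < cj
def pvQ (n0 n1 : Nat) (a b ri cj : Nat) (i j : Nat) : Bool :=
  decide (i / n0 < a ∨ (i / n0 = a ∧ j / n1 < b) ∨
    (i / n0 = a ∧ j / n1 = b ∧ (i % n0 < ri ∨ (i % n0 = ri ∧ j % n1 < cj))))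

theorem pv_pyRange_natCast (s n : Nat) :
    PySem.List.pyRange (s : Int) ((s : Int) + (n : Int)) 1 = (List.range' s n).map (fun k : Nat => (k : Int)) := by
  rw [PySem.List.pyRange_one]
  simp only [add_sub_cancel_left, Int.toNat_natCast]
  apply List.ext_getElem
  · simp
  · intro k h1 h2
    simp [List.getElem_range']

theorem pv_g_bounds (v : Int) : 1 ≤ pvG v ∧ pvG v ≤ 9 := by
  unfold pvG; split_ifs with h <;> omega

theorem pv_step_cell (T : List (List Int)) (n0 n1 i j i' j' : Nat)
    (hb : pvBase T n0 n1 i' j' = pvBase T n0 n1 i j)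
    (hd : i' / n0 + j' / n1 + 1 = i / n0 + j / n1) :
    pvG (pvCell T n0 n1 i' j') = pvCell T n0 n1 i j := by
  unfold pvCell
  rw [hb]
  have hg := pv_g_bounds (pvBase T n0 n1 i j)
  rw [← hd]
  set d' : Nat := i' / n0 + j' / n1 with hd'
  rcases Nat.eq_zero_or_pos d' with h0 | hpos
  · rw [if_pos h0, if_neg (by omega)]
    rw [h0]
    push_cast
    unfold pvG at *
    split_ifs at * <;> omega
  · rw [if_neg (by omega), if_neg (by omega)]
    set x : Int := pvG (pvBase T n0 n1 i j) with hx
    have h9 : 0 ≤ (x - 1 + (d' : Int) - 1) % 9 ∧ (x - 1 + (d' : Int) - 1) % 9 < 9 := by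
      constructor <;> omega
    unfold pvG
    push_cast
    split_ifs with h <;> omega

theorem pvMQ_congr (T : List (List Int)) (n0 n1 R C : Nat) (q q' : Nat → Nat → Bool)
    (h : ∀ i < R, ∀ j < C, pvVal T n0 n1 q i j = pvVal T n0 n1 q' i j) :
    pvMQ T n0 n1 R C q = pvMQ T n0 n1 R C q' := by
  unfold pvMQ
  apply List.map_congr_left
  intro i hi
  rw [List.mem_range] at hi
  apply List.map_congr_left
  intro j hj
  rw [List.mem_range] at hj
  exact h i hi j hj

theorem pv_read (T : List (List Int)) (n0 n1 R C : Nat) (q : Nat → Nat → Bool) (i j : Nat)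
    (hi : i < R) (hj : j < C) :
    PySem.List.pyGetD (PySem.List.pyGetD (pvMQ T n0 n1 R C q) (i : Int) []) (j : Int) 0 = pvVal T n0 n1 q i j := by
  rw [PySem.List.pyGetD_natCast, PySem.List.pyGetD_natCast]
  have hrow : (pvMQ T n0 n1 R C q).getD i [] = (List.range C).map (pvVal T n0 n1 q i) := by
    unfold pvMQ
    rw [List.getD_eq_getElem?_getD, List.getElem?_map, List.getElem?_range hi]
    simp
  rw [hrow, List.getD_eq_getElem?_getD, List.getElem?_map, List.getElem?_range hj]
  simp

theorem pv_write_MQ (T : List (List Int)) (n0 n1 R C : Nat) (q q' : Nat → Nat → Bool) (i j : Nat)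
    (hi : i < R) (hj : j < C)
    (hq : ∀ i' < R, ∀ j' < C, q' i' j' = (q i' j' || (i' == i && j' == j))) :
    PySem.List.pySetD (pvMQ T n0 n1 R C q) (i : Int)
      (PySem.List.pySetD (PySem.List.pyGetD (pvMQ T n0 n1 R C q) (i : Int) []) (j : Int) (pvCell T n0 n1 i j))
    = pvMQ T n0 n1 R C q' := by
  rw [PySem.List.pySetD_natCast, PySem.List.pySetD_natCast, PySem.List.pyGetD_natCast]
  have hrow : (pvMQ T n0 n1 R C q).getD i [] = (List.range C).map (pvVal T n0 n1 q i) := by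
    unfold pvMQ
    rw [List.getD_eq_getElem?_getD, List.getElem?_map, List.getElem?_range hi]
    simp
  rw [hrow]
  apply List.ext_getElem
  · simp [pvMQ]
  · intro k hk1 hk2
    simp only [pvMQ, List.length_map, List.length_range] at hk2
    rw [List.getElem_set]
    simp only [pvMQ, List.getElem_map, List.getElem_range]
    by_cases hik : i = k
    · subst hik
      rw [if_pos rfl]
      apply List.ext_getElem
      · simp
      · intro l hl1 hl2
        simp only [List.length_map, List.length_range] at hl2
        rw [List.getElem_set]
        simp only [List.getElem_map, List.getElem_range]
        by_cases hjl : j = l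
        · subst hjl
          rw [if_pos rfl, pvVal, hq i hi j hj]
          simp only [beq_self_eq_true, Bool.and_self, Bool.or_true, if_true]
        · rw [if_neg hjl]
          have hql := hq i hk2 l hl2
          have hlj : (l == j) = false := by simp; exact fun h => hjl h.symm
          rw [hlj] at hql
          simp only [Bool.and_false, Bool.or_false] at hql
          rw [pvVal, pvVal, hql]
    · rw [if_neg hik]
      apply List.map_congr_left
      intro l hl
      rw [List.mem_range] at hl
      have hqk := hq k hk2 l hl
      have : (k == i) = false := by simp; exact fun h => hik h.symm
      rw [this] at hqk
      simp only [Bool.false_and, Bool.or_false] at hqk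
      rw [pvVal, pvVal, hqk]


theorem pv_blk_lt {n a e r : Nat} (ha : a < e) (hr : r < n) : n * a + r < n * e := by
  have h1 : n * (a + 1) ≤ n * e := Nat.mul_le_mul_left n ha
  have h2 : n * (a + 1) = n * a + n := by ring
  omega

theorem pv_blk_div {n : Nat} (a r : Nat) (hr : r < n) : (n * a + r) / n = a := by
  rw [Nat.mul_add_div (by omega)]
  simp [Nat.div_eq_of_lt hr]

theorem pv_blk_mod {n : Nat} (a r : Nat) (hr : r < n) : (n * a + r) % n = r := by
  rw [Nat.mul_add_mod]
  exact Nat.mod_eq_of_lt hr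

theorem pv_eq_iff {n : Nat} (x y : Nat) (_hn : 0 < n) : x = y ↔ (x / n = y / n ∧ x % n = y % n) := by
  constructor
  · intro h; subst h; exact ⟨rfl, rfl⟩
  · rintro ⟨h1, h2⟩
    have hx := Nat.div_add_mod x n
    have hy := Nat.div_add_mod y n
    rw [← hx, ← hy, h1, h2]

theorem pv_div_lt {n e j : Nat} (hj : j < n * e) : j / n < e :=
  Nat.div_lt_of_lt_mul (by omega)

theorem pv_pos_of_lt {n e j : Nat} (hj : j < n * e) : 0 < n := by
  rcases Nat.eq_zero_or_pos n with h | h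
  · subst h; simp at hj
  · exact h

-- pvQ transitions
theorem pvQ_succ_col {n0 n1 a b ri cj : Nat} (hri : ri < n0) (hcj : cj < n1) (i j : Nat) :
    pvQ n0 n1 a b ri (cj + 1) i j
      = (pvQ n0 n1 a b ri cj i j || (i == n0 * a + ri && j == n1 * b + cj)) := by
  have h0 : 0 < n0 := by omega
  have h1 : 0 < n1 := by omega
  rw [Bool.eq_iff_iff]
  simp only [pvQ, Bool.or_eq_true, Bool.and_eq_true, beq_iff_eq, decide_eq_true_eq]
  rw [pv_eq_iff i (n0 * a + ri) h0, pv_eq_iff j (n1 * b + cj) h1,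
    pv_blk_div a ri hri, pv_blk_mod a ri hri, pv_blk_div b cj hcj, pv_blk_mod b cj hcj]
  omega

theorem pvQ_row_end {n0 n1 e a b ri : Nat} (T : List (List Int)) :
    pvMQ T n0 n1 (n0 * e) (n1 * e) (pvQ n0 n1 a b ri n1)
      = pvMQ T n0 n1 (n0 * e) (n1 * e) (pvQ n0 n1 a b (ri + 1) 0) := by
  apply pvMQ_congr
  intro i hi j hj
  have h1 : 0 < n1 := pv_pos_of_lt hj
  have hm : j % n1 < n1 := Nat.mod_lt _ h1
  have hq : pvQ n0 n1 a b ri n1 i j = pvQ n0 n1 a b (ri + 1) 0 i j := by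
    rw [Bool.eq_iff_iff]
    simp only [pvQ, decide_eq_true_eq, Nat.not_lt_zero, and_false, or_false]
    omega
  rw [pvVal, pvVal, hq]

theorem pvQ_tile_end {n0 n1 e a b : Nat} (T : List (List Int)) :
    pvMQ T n0 n1 (n0 * e) (n1 * e) (pvQ n0 n1 a b n0 0)
      = pvMQ T n0 n1 (n0 * e) (n1 * e) (pvQ n0 n1 a (b + 1) 0 0) := by
  apply pvMQ_congr
  intro i hi j hj
  have h0 : 0 < n0 := pv_pos_of_lt hi
  have hm : i % n0 < n0 := Nat.mod_lt _ h0
  have hq : pvQ n0 n1 a b n0 0 i j = pvQ n0 n1 a (b + 1) 0 0 i j := by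
    rw [Bool.eq_iff_iff]
    simp only [pvQ, decide_eq_true_eq, Nat.not_lt_zero, and_false, or_false]
    omega
  rw [pvVal, pvVal, hq]

theorem pvQ_tilerow_end {n0 n1 e a : Nat} (T : List (List Int)) :
    pvMQ T n0 n1 (n0 * e) (n1 * e) (pvQ n0 n1 a e 0 0)
      = pvMQ T n0 n1 (n0 * e) (n1 * e) (pvQ n0 n1 (a + 1) 0 0 0) := by
  apply pvMQ_congr
  intro i hi j hj
  have h1 : j / n1 < e := pv_div_lt hj
  have hq : pvQ n0 n1 a e 0 0 i j = pvQ n0 n1 (a + 1) 0 0 0 i j := by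
    rw [Bool.eq_iff_iff]
    simp only [pvQ, decide_eq_true_eq, Nat.not_lt_zero, and_false, or_false]
    omega
  rw [pvVal, pvVal, hq]

theorem pvQ_final {n0 n1 e : Nat} (T : List (List Int)) :
    pvMQ T n0 n1 (n0 * e) (n1 * e) (pvQ n0 n1 e 0 0 0)
      = pvMQ T n0 n1 (n0 * e) (n1 * e) (fun _ _ => true) := by
  apply pvMQ_congr
  intro i hi j hj
  have h0 : i / n0 < e := pv_div_lt hi
  have hq : pvQ n0 n1 e 0 0 0 i j = true := by
    simp only [pvQ, decide_eq_true_eq]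
    exact Or.inl h0
  rw [pvVal, pvVal, hq]


theorem pv_neighbor_left (n0 n1 e a b ri cj : Nat) (hb1 : 0 < b)
    (hi : n0 * a + ri < n0 * e) (hj : n1 * b + cj < n1 * e) :
    get_neighbor_tile_pos (((n0 * a + ri : Nat) : Int), ((n1 * b + cj : Nat) : Int))
      ((n0 : Int), (n1 : Int)) (((n0 * e : Nat) : Int), ((n1 * e : Nat) : Int))
    = (((n0 * a + ri : Nat) : Int), ((n1 * (b - 1) + cj : Nat) : Int)) := by
  obtain ⟨b', rfl⟩ : ∃ b', b = b' + 1 := ⟨b - 1, by omega⟩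
  have hmul : n1 * (b' + 1) = n1 * b' + n1 := by ring
  unfold get_neighbor_tile_pos
  dsimp only
  rw [if_pos]
  · simp only [Prod.mk.injEq, Nat.add_sub_cancel]
    refine ⟨trivial, ?_⟩
    rw [hmul] at hj ⊢
    push_cast
    omega
  · refine ⟨Int.natCast_nonneg _, by exact_mod_cast hi, ?_, ?_⟩ <;>
      · rw [hmul] at hj ⊢
        push_cast at hj ⊢
        omega

theorem pv_neighbor_up (n0 n1 e a ri cj : Nat) (ha1 : 0 < a)
    (hi : n0 * a + ri < n0 * e) (hcj : cj < n1) :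
    get_neighbor_tile_pos (((n0 * a + ri : Nat) : Int), ((n1 * 0 + cj : Nat) : Int))
      ((n0 : Int), (n1 : Int)) (((n0 * e : Nat) : Int), ((n1 * e : Nat) : Int))
    = (((n0 * (a - 1) + ri : Nat) : Int), ((n1 * 0 + cj : Nat) : Int)) := by
  obtain ⟨a', rfl⟩ : ∃ a', a = a' + 1 := ⟨a - 1, by omega⟩
  have hmul : n0 * (a' + 1) = n0 * a' + n0 := by ring
  unfold get_neighbor_tile_pos
  dsimp only
  rw [if_neg]
  · simp only [Prod.mk.injEq, Nat.add_sub_cancel]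
    refine ⟨?_, trivial⟩
    rw [hmul] at hi ⊢
    push_cast
    omega
  · intro hcond
    have h3 := hcond.2.2.1
    simp only [Nat.mul_zero, zero_add] at h3
    omega

theorem pv_write_step (T : List (List Int)) (n0 n1 e a b ri cj : Nat)
    (ha : a < e) (hb : b < e) (hab : 0 < a ∨ 0 < b) (hri : ri < n0) (hcj : cj < n1) :
    pvWrite ((n0 : Int), (n1 : Int)) (((n0 * e : Nat) : Int), ((n1 * e : Nat) : Int))
      ((n0 * a + ri : Nat) : Int)
      (pvMQ T n0 n1 (n0 * e) (n1 * e) (pvQ n0 n1 a b ri cj)) ((n1 * b + cj : Nat) : Int)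
    = pvMQ T n0 n1 (n0 * e) (n1 * e) (pvQ n0 n1 a b ri (cj + 1)) := by
  have hi : n0 * a + ri < n0 * e := pv_blk_lt ha hri
  have hj : n1 * b + cj < n1 * e := pv_blk_lt hb hcj
  have h0 : 0 < n0 := by omega
  have h1 : 0 < n1 := by omega
  unfold pvWrite
  rcases Nat.eq_zero_or_pos b with hb0 | hb1
  · -- neighbor is the upper tile
    subst hb0
    have ha1 : 0 < a := by omega
    rw [pv_neighbor_up n0 n1 e a ri cj ha1 hi hcj]
    have hi' : n0 * (a - 1) + ri < n0 * e := pv_blk_lt (by omega) hri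
    rw [pv_read T n0 n1 (n0 * e) (n1 * e) _ _ _ hi' hj]
    have hq : pvQ n0 n1 a 0 ri cj (n0 * (a - 1) + ri) (n1 * 0 + cj) = true := by
      simp only [pvQ, decide_eq_true_eq]
      exact Or.inl (by rw [pv_blk_div _ _ hri]; omega)
    rw [pvVal, hq, if_pos rfl]
    have hv : pvOr1 (PySem.Int.mod (pvCell T n0 n1 (n0 * (a - 1) + ri) (n1 * 0 + cj) + 1) 10)
        = pvCell T n0 n1 (n0 * a + ri) (n1 * 0 + cj) := by
      rw [PySem.Int.mod_eq_emod_of_pos (by norm_num)]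
      unfold pvOr1
      rw [← pv_step_cell T n0 n1 (n0 * a + ri) (n1 * 0 + cj) (n0 * (a - 1) + ri) (n1 * 0 + cj)]
      · rfl
      · unfold pvBase
        rw [pv_blk_mod _ _ hri, pv_blk_mod _ _ hri]
      · have e1 := pv_blk_div (n := n0) (a - 1) ri hri
        have e2 := pv_blk_div (n := n0) a ri hri
        have e3 := pv_blk_div (n := n1) 0 cj hcj
        omega
    rw [hv]
    exact pv_write_MQ T n0 n1 (n0 * e) (n1 * e) _ _ _ _ hi hj
      (fun i' _ j' _ => pvQ_succ_col hri hcj i' j')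
  · -- neighbor is the left tile
    rw [pv_neighbor_left n0 n1 e a b ri cj hb1 hi hj]
    have hj' : n1 * (b - 1) + cj < n1 * e := pv_blk_lt (by omega) hcj
    rw [pv_read T n0 n1 (n0 * e) (n1 * e) _ _ _ hi hj']
    have hq : pvQ n0 n1 a b ri cj (n0 * a + ri) (n1 * (b - 1) + cj) = true := by
      simp only [pvQ, decide_eq_true_eq]
      exact Or.inr (Or.inl ⟨pv_blk_div _ _ hri, by rw [pv_blk_div _ _ hcj]; omega⟩)
    rw [pvVal, hq, if_pos rfl]
    have hv : pvOr1 (PySem.Int.mod (pvCell T n0 n1 (n0 * a + ri) (n1 * (b - 1) + cj) + 1) 10)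
        = pvCell T n0 n1 (n0 * a + ri) (n1 * b + cj) := by
      rw [PySem.Int.mod_eq_emod_of_pos (by norm_num)]
      unfold pvOr1
      rw [← pv_step_cell T n0 n1 (n0 * a + ri) (n1 * b + cj) (n0 * a + ri) (n1 * (b - 1) + cj)]
      · rfl
      · unfold pvBase
        rw [pv_blk_mod _ _ hcj, pv_blk_mod _ _ hcj]
      · have e1 := pv_blk_div (n := n1) (b - 1) cj hcj
        have e2 := pv_blk_div (n := n1) b cj hcj
        omega
    rw [hv]
    exact pv_write_MQ T n0 n1 (n0 * e) (n1 * e) _ _ _ _ hi hj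
      (fun i' _ j' _ => pvQ_succ_col hri hcj i' j')


theorem pv_cols (T : List (List Int)) (n0 n1 e a b ri : Nat)
    (ha : a < e) (hb : b < e) (hab : 0 < a ∨ 0 < b) (hri : ri < n0) :
    ∀ cnt cj, cj + cnt = n1 →
    (List.range' (n1 * b + cj) cnt).foldl
      (fun m (jj : Nat) => pvWrite ((n0 : Int), (n1 : Int)) (((n0 * e : Nat) : Int), ((n1 * e : Nat) : Int))
        ((n0 * a + ri : Nat) : Int) m (jj : Int))
      (pvMQ T n0 n1 (n0 * e) (n1 * e) (pvQ n0 n1 a b ri cj))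
    = pvMQ T n0 n1 (n0 * e) (n1 * e) (pvQ n0 n1 a b ri n1) := by
  intro cnt
  induction cnt with
  | zero =>
    intro cj h
    have : cj = n1 := by omega
    subst this
    rfl
  | succ k ih =>
    intro cj h
    rw [List.range'_succ, List.foldl_cons]
    rw [pv_write_step T n0 n1 e a b ri cj ha hb hab hri (by omega)]
    have h2 := ih (cj + 1) (by omega)
    rw [← Nat.add_assoc] at h2
    exact h2

theorem pv_rows (T : List (List Int)) (n0 n1 e a b : Nat)
    (ha : a < e) (hb : b < e) (hab : 0 < a ∨ 0 < b) :
    ∀ cnt ri, ri + cnt = n0 →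
    (List.range' (n0 * a + ri) cnt).foldl
      (fun m (ii : Nat) =>
        (PySem.List.pyRange ((n1 * b : Nat) : Int) (((n1 * b : Nat) : Int) + (n1 : Int)) 1).foldl
          (pvWrite ((n0 : Int), (n1 : Int)) (((n0 * e : Nat) : Int), ((n1 * e : Nat) : Int)) (ii : Int)) m)
      (pvMQ T n0 n1 (n0 * e) (n1 * e) (pvQ n0 n1 a b ri 0))
    = pvMQ T n0 n1 (n0 * e) (n1 * e) (pvQ n0 n1 a b n0 0) := by
  intro cnt
  induction cnt with
  | zero =>
    intro ri h
    have : ri = n0 := by omega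
    subst this
    rfl
  | succ k ih =>
    intro ri h
    rw [List.range'_succ, List.foldl_cons]
    rw [pv_pyRange_natCast (n1 * b) n1, List.foldl_map]
    have hcols := pv_cols T n0 n1 e a b ri ha hb hab (by omega) n1 0 (by omega)
    rw [Nat.add_zero] at hcols
    rw [hcols]
    rw [pvQ_row_end T]
    have h2 := ih (ri + 1) (by omega)
    rw [← Nat.add_assoc, pv_pyRange_natCast (n1 * b) n1] at h2
    exact h2

theorem pv_tile (T : List (List Int)) (n0 n1 e a b : Nat)
    (ha : a < e) (hb : b < e) (hab : 0 < a ∨ 0 < b) :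
    pvTileLoop ((n0 : Int), (n1 : Int)) (((n0 * e : Nat) : Int), ((n1 * e : Nat) : Int))
      (pvMQ T n0 n1 (n0 * e) (n1 * e) (pvQ n0 n1 a b 0 0)) (((n0 * a : Nat) : Int), ((n1 * b : Nat) : Int))
    = pvMQ T n0 n1 (n0 * e) (n1 * e) (pvQ n0 n1 a (b + 1) 0 0) := by
  unfold pvTileLoop
  dsimp only
  rw [pv_pyRange_natCast (n0 * a) n0, List.foldl_map]
  have hrows := pv_rows T n0 n1 e a b ha hb hab n0 0 (by omega)
  rw [Nat.add_zero] at hrows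
  rw [hrows, pvQ_tile_end T]

theorem pv_tilerow (T : List (List Int)) (n0 n1 e a : Nat) (ha : a < e) :
    ∀ cnt b0, (0 < a ∨ 0 < b0) → b0 + cnt = e →
    (List.range' b0 cnt).foldl
      (fun m (b' : Nat) => pvTileLoop ((n0 : Int), (n1 : Int)) (((n0 * e : Nat) : Int), ((n1 * e : Nat) : Int))
        m (((n0 * a : Nat) : Int), ((n1 * b' : Nat) : Int)))
      (pvMQ T n0 n1 (n0 * e) (n1 * e) (pvQ n0 n1 a b0 0 0))
    = pvMQ T n0 n1 (n0 * e) (n1 * e) (pvQ n0 n1 a e 0 0) := by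
  intro cnt
  induction cnt with
  | zero =>
    intro b0 hab h
    have : b0 = e := by omega
    subst this
    rfl
  | succ k ih =>
    intro b0 hab h
    rw [List.range'_succ, List.foldl_cons]
    rw [pv_tile T n0 n1 e a b0 ha (by omega) hab]
    exact ih (b0 + 1) (Or.inr (by omega)) (by omega)

theorem pv_outer (T : List (List Int)) (n0 n1 e : Nat) :
    ∀ cnt a0, 0 < a0 → a0 + cnt = e →
    (List.range' a0 cnt).foldl
      (fun m (a' : Nat) =>
        (List.range e).foldl
          (fun m (b' : Nat) => pvTileLoop ((n0 : Int), (n1 : Int)) (((n0 * e : Nat) : Int), ((n1 * e : Nat) : Int))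
            m (((n0 * a' : Nat) : Int), ((n1 * b' : Nat) : Int))) m)
      (pvMQ T n0 n1 (n0 * e) (n1 * e) (pvQ n0 n1 a0 0 0 0))
    = pvMQ T n0 n1 (n0 * e) (n1 * e) (pvQ n0 n1 e 0 0 0) := by
  intro cnt
  induction cnt with
  | zero =>
    intro a0 ha0 h
    have : a0 = e := by omega
    subst this
    rfl
  | succ k ih =>
    intro a0 ha0 h
    rw [List.range'_succ, List.foldl_cons]
    rw [List.range_eq_range']
    rw [pv_tilerow T n0 n1 e a0 (by omega) e 0 (Or.inl ha0) (by omega)]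
    rw [pvQ_tilerow_end T]
    have h2 := ih (a0 + 1) (by omega) (by omega)
    rw [List.range_eq_range'] at h2
    exact h2

theorem pv_counter (P : List (Int × Int)) :
    ∀ (acc : List (Int × Int)) (c : Int), 1 ≤ c →
    (P.foldl (fun (st : List (Int × Int) × Int) p => (if st.2 ≥ 1 then st.1 ++ [p] else st.1, st.2 + 1)) (acc, c)).1
    = acc ++ P := by
  induction P with
  | nil => intro acc c hc; simp
  | cons p P' ih =>
    intro acc c hc
    rw [List.foldl_cons]
    dsimp only
    rw [if_pos hc]
    rw [ih (acc ++ [p]) (c + 1) (by omega)]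
    simp

theorem pv_iterate (ts : Int × Int) (eb : Int) :
    iterate_tiles ts eb 1
    = ((PySem.List.pyRange 0 eb 1).flatMap (fun i =>
        (PySem.List.pyRange 0 eb 1).map (fun j => (ts.1 * i, ts.2 * j)))).drop 1 := by
  unfold iterate_tiles
  have hinner : ∀ (st : List (Int × Int) × Int) (i : Int),
      (PySem.List.pyRange 0 eb 1).foldl
        (fun (st : List (Int × Int) × Int) j =>
          ((if st.2 ≥ 1 then st.1 ++ [(ts.1 * i, ts.2 * j)] else st.1), st.2 + 1)) st
      = ((PySem.List.pyRange 0 eb 1).map (fun j => (ts.1 * i, ts.2 * j))).foldl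
          (fun (st : List (Int × Int) × Int) p => ((if st.2 ≥ 1 then st.1 ++ [p] else st.1), st.2 + 1)) st := by
    intro st i
    rw [List.foldl_map]
  have h2 : (fun (st : List (Int × Int) × Int) (i : Int) =>
      (PySem.List.pyRange 0 eb 1).foldl
        (fun (st : List (Int × Int) × Int) j =>
          ((if st.2 ≥ 1 then st.1 ++ [(ts.1 * i, ts.2 * j)] else st.1), st.2 + 1)) st)
      = (fun (st : List (Int × Int) × Int) (i : Int) =>
        ((PySem.List.pyRange 0 eb 1).map (fun j => (ts.1 * i, ts.2 * j))).foldl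
          (fun (st : List (Int × Int) × Int) p => ((if st.2 ≥ 1 then st.1 ++ [p] else st.1), st.2 + 1)) st) := by
    funext st i
    exact hinner st i
  rw [h2, ← List.foldl_flatMap]
  generalize ((PySem.List.pyRange 0 eb 1).flatMap (fun i =>
    (PySem.List.pyRange 0 eb 1).map (fun j => (ts.1 * i, ts.2 * j)))) = P
  cases P with
  | nil => rfl
  | cons p P' =>
    rw [List.foldl_cons]
    dsimp only
    rw [if_neg (by norm_num)]
    rw [pv_counter P' [] (0 + 1) (by omega)]
    rfl

theorem pv_flat_getD (xs : List Int) :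
    ∀ (e j : Nat), j < e * xs.length →
    ((List.replicate e xs).flatten).getD j 0 = xs.getD (j % xs.length) 0 := by
  intro e
  induction e with
  | zero => intro j hj; simp at hj
  | succ k ih =>
    intro j hj
    rw [List.replicate_succ, List.flatten_cons]
    by_cases hlt : j < xs.length
    · rw [List.getD_append _ _ _ _ hlt, Nat.mod_eq_of_lt hlt]
    · rw [Nat.not_lt] at hlt
      rw [List.getD_append_right _ _ _ _ hlt]
      rw [Nat.succ_mul] at hj
      have hj' : j - xs.length < k * xs.length := by omega
      rw [ih (j - xs.length) hj']
      congr 1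
      conv_rhs => rw [← Nat.sub_add_cancel hlt]
      rw [Nat.add_mod_right]

theorem pv_init (T : List (List Int)) (n0 n1 e : Nat) (hn0 : T.length = n0)
    (hrow : ∀ r ∈ T, r.length = n1) (h0 : 0 < n0) :
    (List.range (n0 * e)).map (fun i => (List.replicate e (T.getD (i % n0) [])).flatten)
    = pvMQ T n0 n1 (n0 * e) (n1 * e) (pvQ n0 n1 0 1 0 0) := by
  unfold pvMQ
  apply List.map_congr_left
  intro i hi
  rw [List.mem_range] at hi
  have hmlt : i % n0 < T.length := by rw [hn0]; exact Nat.mod_lt _ h0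
  have hmem : T.getD (i % n0) [] ∈ T := by
    rw [List.getD_eq_getElem _ _ hmlt]
    exact List.getElem_mem _
  have hlen : (T.getD (i % n0) []).length = n1 := hrow _ hmem
  have hflatlen : (List.replicate e (T.getD (i % n0) [])).flatten.length = e * n1 := by
    rw [List.length_flatten, List.map_replicate, hlen, List.sum_replicate, smul_eq_mul]
  apply List.ext_getElem
  · rw [hflatlen, List.length_map, List.length_range]
    exact Nat.mul_comm e n1
  · intro k hk1 hk2
    simp only [List.getElem_map, List.getElem_range]
    have hkC : k < n1 * e := by
      simpa using hk2
    refine ((List.getD_eq_getElem (List.replicate e (T.getD (i % n0) [])).flatten 0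
      (by rw [hflatlen, Nat.mul_comm]; exact hkC)).symm).trans ?_
    rw [pv_flat_getD _ e k (by rw [hlen, Nat.mul_comm]; exact hkC), hlen]
    cases hq0 : pvQ n0 n1 0 1 0 0 i k with
    | false => rw [pvVal, hq0]; rfl
    | true =>
      rw [pvVal, hq0, if_pos rfl]
      simp only [pvQ, decide_eq_true_eq, Nat.not_lt_zero, and_false, or_false, false_or] at hq0
      unfold pvCell
      rw [if_pos (by rw [hq0.1, Nat.lt_one_iff.mp hq0.2])]
      rfl

theorem pv_tileLoop_id (ts ms : Int × Int) (m : List (List Int)) (sc : Int × Int) (h : ts.1 ≤ 0) :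
    pvTileLoop ts ms m sc = m := by
  unfold pvTileLoop
  rw [PySem.List.pyRange_one_eq_nil (show sc.1 + ts.1 ≤ sc.1 by omega)]
  rfl

theorem pv_foldl_id {α β : Type} (f : α → β → α) (h : ∀ m x, f m x = m) :
    ∀ (L : List β) (init : α), L.foldl f init = init := by
  intro L
  induction L with
  | nil => intro init; rfl
  | cons x L' ih =>
    intro init
    rw [List.foldl_cons, h]
    exact ih init

theorem pv_B (T : List (List Int)) (ts : Int × Int) (eb : Int) (n0 n1 e : Nat)
    (hts1 : ts.1 = (n0 : Int)) (hts2 : ts.2 = (n1 : Int)) (heb : eb = (e : Int)) :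
    prepare_density_map_alt T ts eb
    = pvMQ T n0 n1 (n0 * e) (n1 * e) (fun _ _ => true) := by
  have hMQ : pvMQ T n0 n1 (n0 * e) (n1 * e) (fun _ _ => true)
      = (List.range (n0 * e)).map (fun i => (List.range (n1 * e)).map (fun j => pvCell T n0 n1 i j)) := by
    unfold pvMQ pvVal
    simp
  rw [hMQ]
  unfold prepare_density_map_alt
  rw [hts1, hts2, heb, ← Nat.cast_mul n0 e, ← Nat.cast_mul n1 e]
  rw [PySem.List.pyRange_zero_nat (n0 * e), PySem.List.pyRange_zero_nat (n1 * e)]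
  rw [List.map_map]
  apply List.map_congr_left
  intro i hi
  rw [List.mem_range] at hi
  simp only [Function.comp]
  rw [List.map_map]
  apply List.map_congr_left
  intro j hj
  rw [List.mem_range] at hj
  simp only [Function.comp]
  rw [PySem.Int.mod_natCast i n0, PySem.Int.mod_natCast j n1,
    PySem.List.pyGetD_natCast T (i % n0) [],
    PySem.List.pyGetD_natCast (T.getD (i % n0) []) (j % n1) 0,
    PySem.Int.floordiv_natCast i n0, PySem.Int.floordiv_natCast j n1]
  unfold pvCell pvBase pvG
  rw [PySem.Int.mod_eq_emod_of_pos (by norm_num), PySem.Int.mod_eq_emod_of_pos (by norm_num)]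
  have hcast : ((i / n0 : Nat) : Int) + ((j / n1 : Nat) : Int) = ((i / n0 + j / n1 : Nat) : Int) := by
    push_cast; ring
  rw [hcast]
  by_cases hz : i / n0 + j / n1 = 0
  · rw [if_pos (by exact_mod_cast congrArg (Nat.cast : Nat → Int) hz), if_pos hz]
  · rw [if_neg (by exact_mod_cast hz), if_neg hz]
    congr 1
    congr 1
    ring

theorem pv_flatMap_split {α : Type} (G : Nat → List α) (n : Nat) :
    (List.range (n + 1)).flatMap G = G 0 ++ (List.range' 1 n).flatMap G := by
  rw [List.range_eq_range', List.range'_succ, List.flatMap_cons]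

theorem pv_map_drop {α : Type} (f : Nat → α) (n : Nat) :
    (List.map f (List.range (n + 1))).drop 1 = List.map f (List.range' 1 n) := by
  rw [List.range_eq_range', List.range'_succ, List.map_cons, List.drop_one, List.tail_cons]

theorem pv_main (T : List (List Int)) (ts : Int × Int) (eb : Int) (n0 n1 e : Nat)
    (hts1 : ts.1 = (n0 : Int)) (hts2 : ts.2 = (n1 : Int)) (heb : eb = (e : Int))
    (hn0 : T.length = n0) (h0 : 0 < n0) (he : 0 < e) (hrow : ∀ r ∈ T, r.length = n1) :
    prepare_density_map T ts eb = prepare_density_map_alt T ts eb := by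
  obtain ⟨e', rfl⟩ : ∃ e', e = e' + 1 := ⟨e - 1, by omega⟩
  have hts : ts = ((n0 : Int), (n1 : Int)) := Prod.ext_iff.mpr ⟨hts1, hts2⟩
  subst hts
  rw [pv_B T _ eb n0 n1 (e' + 1) rfl rfl heb]
  unfold prepare_density_map
  rw [pv_iterate _ eb]
  rw [heb]
  dsimp only
  rw [← Nat.cast_mul n0 (e' + 1), ← Nat.cast_mul n1 (e' + 1)]
  have hinit : ((PySem.List.pyRange 0 ((n0 * (e' + 1) : Nat) : Int) 1).map (fun i =>
      PySem.List.pyRepeat (PySem.List.pyGetD T (PySem.Int.mod i (n0 : Int)) []) ((e' + 1 : Nat) : Int)))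
      = pvMQ T n0 n1 (n0 * (e' + 1)) (n1 * (e' + 1)) (pvQ n0 n1 0 1 0 0) := by
    rw [PySem.List.pyRange_zero_nat (n0 * (e' + 1)), List.map_map]
    rw [← pv_init T n0 n1 (e' + 1) hn0 hrow h0]
    apply List.map_congr_left
    intro k hk
    simp only [Function.comp]
    rw [PySem.Int.mod_natCast k n0, PySem.List.pyGetD_natCast T (k % n0) []]
    unfold PySem.List.pyRepeat
    rw [Int.toNat_natCast]
  rw [hinit]
  rw [PySem.List.pyRange_zero_nat (e' + 1)]
  rw [List.flatMap_map]
  simp only [Function.comp_def, List.map_map, ← Nat.cast_mul]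
  rw [pv_flatMap_split]
  rw [List.drop_append_of_le_length (by simp)]
  rw [pv_map_drop]
  rw [List.foldl_append]
  rw [List.foldl_map]
  have h1 := pv_tilerow T n0 n1 (e' + 1) 0 (by omega) e' 1 (Or.inr Nat.one_pos) (by omega)
  rw [h1, pvQ_tilerow_end T]
  rw [List.foldl_flatMap]
  simp only [List.foldl_map, Nat.zero_add]
  have h2 := pv_outer T n0 n1 (e' + 1) e' 1 Nat.one_pos (by omega)
  rw [h2, pvQ_final T]
-- ===== VERDICT (by name: the statement is the Claim_ definition above) =====
theorem prepare_density_map_spec : Claim_equal_prepare_density_map := by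
  intro T ts eb _hDom hPre
  unfold Spec_prepare_density_map
  have hdeg : ts.1 * eb ≤ 0 → prepare_density_map T ts eb = prepare_density_map_alt T ts eb := by
    intro hle
    unfold prepare_density_map prepare_density_map_alt
    rw [PySem.List.pyRange_one_eq_nil (show ts.1 * eb ≤ (0 : Int) from hle)]
    simp only [List.map_nil]
    rcases (by omega : eb ≤ 0 ∨ 0 < eb) with h | h
    · unfold iterate_tiles
      rw [PySem.List.pyRange_one_eq_nil (show eb ≤ (0 : Int) from h)]
      rfl
    · have hts1 : ts.1 ≤ 0 := by
        by_contra hh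
        rw [Int.not_le] at hh
        have := mul_pos hh h
        omega
      apply pv_foldl_id
      intro m sc
      exact pv_tileLoop_id _ _ m sc hts1
  rcases hPre with hle | ⟨h1, h2⟩
  · exact hdeg hle
  · by_cases hle : ts.1 * eb ≤ 0
    · exact hdeg hle
    · rw [Int.not_le] at hle
      have h0ts : (0 : Int) ≤ ts.1 := by rw [h1]; exact Int.natCast_nonneg _
      have hebpos : 1 ≤ eb := by
        rcases (by omega : eb ≤ 0 ∨ 0 < eb) with h | h
        · exfalso
          have := mul_nonpos_iff.mpr (Or.inl ⟨h0ts, h⟩)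
          omega
        · omega
      have hT : T ≠ [] := by
        intro hnil
        subst hnil
        simp only [List.length_nil, Nat.cast_zero] at h1
        rw [h1, zero_mul] at hle
        exact lt_irrefl 0 hle
      obtain ⟨r, hrmem⟩ : ∃ r, r ∈ T := ⟨T.head hT, List.head_mem hT⟩
      exact pv_main T ts eb T.length r.length eb.toNat h1
        ((h2 r hrmem).symm)
        ((Int.toNat_of_nonneg (by omega)).symm)
        rfl
        (List.length_pos_iff.mpr hT)
        (by omega)
        (fun r' hr' => by
          have ha := h2 r' hr'
          have hb := h2 r hrmem
          exact_mod_cast ha.trans hb.symm)
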